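-- pv_equiv track=rewrite | github.com/btran565/PythonPractice | swears.py | censor
-- ===== SOURCE A (Python) =====
-- swears = ("duck", "shoot", "poopie")
--
-- def censor(phrase):
--
-- 	check = ""
-- 	if check == phrase:										#checks if phrase is empty
-- 		return "The phrase is empty."
-- 	else:
-- 		sentence = phrase
-- 		for swear in swears:								#traverses swears
-- 			if swear in sentence:							#checks phrase for swear
-- 				censored = "***"
-- 				sentence = sentence.replace(swear, censored)
--
--
-- 		return sentence
-- ===== SOURCE B (Python) =====
-- swears = ("duck", "shoot", "poopie")
--
-- def censor(phrase):
--     if phrase == "":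
--         return "The phrase is empty."
--     out = []
--     i = 0
--     n = len(phrase)
--     while i < n:
--         for swear in swears:
--             if phrase.startswith(swear, i):
--                 out.append("***")
--                 i += len(swear)
--                 break
--         else:
--             out.append(phrase[i])
--             i += 1
--     return "".join(out)
-- ===== Notes on version B (the rewrite author's own statement) =====
-- stated objective: alternative
-- what changed: B replaces A's three sequential full-string replace passes with a single left-to-right scan that tests each position for a swear-word prefix once (possible because the three words share no overlaps and '***' cannot create new matches).
import Mathlib
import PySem

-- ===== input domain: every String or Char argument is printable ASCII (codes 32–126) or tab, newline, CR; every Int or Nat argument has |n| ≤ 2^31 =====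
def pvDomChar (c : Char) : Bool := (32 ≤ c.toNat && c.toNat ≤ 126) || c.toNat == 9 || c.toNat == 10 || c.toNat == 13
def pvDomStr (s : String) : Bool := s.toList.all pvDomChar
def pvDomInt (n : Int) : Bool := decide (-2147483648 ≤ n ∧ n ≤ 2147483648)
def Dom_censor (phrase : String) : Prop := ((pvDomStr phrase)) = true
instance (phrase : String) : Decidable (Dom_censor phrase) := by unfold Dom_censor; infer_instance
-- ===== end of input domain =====

-- B does one left-to-right scan over the phrase instead of A's three sequential replace passes; same result since the words do not overlap.

-- ===== PORT A =====
def censor (phrase : String) : String :=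
  if "" == phrase then "The phrase is empty."
  else
    let sentence := phrase
    let sentence := ["duck", "shoot", "poopie"].foldl (fun sentence swear =>
      if PySem.Str.isIn swear sentence then
        let censored := "***"
        PySem.Str.replace sentence swear censored
      else sentence) sentence
    sentence

-- ===== PORT B =====
-- single pass: at each position try the three swear prefixes, else copy the char
def censorScan : List Char → List Char
  | [] => []
  | c :: t =>
    if ['d','u','c','k'].isPrefixOf (c :: t) then '*' :: '*' :: '*' :: censorScan (t.drop 3)
    else if ['s','h','o','o','t'].isPrefixOf (c :: t) then '*' :: '*' :: '*' :: censorScan (t.drop 4)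
    else if ['p','o','o','p','i','e'].isPrefixOf (c :: t) then '*' :: '*' :: '*' :: censorScan (t.drop 5)
    else c :: censorScan t
termination_by l => l.length
decreasing_by all_goals simp [List.length_drop]

def censor_alt (phrase : String) : String :=
  if phrase == "" then "The phrase is empty."
  else String.ofList (censorScan phrase.toList)

-- ===== PRECONDITION & SPEC =====
def Spec_censor (phrase : String) (out : String) : Prop := out = censor_alt phrase
instance (phrase : String) (out : String) : Decidable (Spec_censor phrase out) := by unfold Spec_censor; infer_instance

-- ===== CLAIM (what is proved, stated in full; the proofs are below) =====
def Claim_equal_censor : Prop := ∀ (phrase : String), Dom_censor phrase → Spec_censor phrase (censor phrase)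

-- ===== LEMMAS AND PROOFS =====

-- clean recursion equivalent to PySem.Chars.replace for a nonempty pattern
def rep1 (c0 : Char) (p new : List Char) : List Char → List Char
  | [] => []
  | c :: t =>
    if (c0 :: p).isPrefixOf (c :: t) then new ++ rep1 c0 p new (t.drop p.length)
    else c :: rep1 c0 p new t
termination_by l => l.length
decreasing_by all_goals simp [List.length_drop]

theorem go_spec (c0 : Char) (p new : List Char) :
    ∀ fuel l acc, l.length ≤ fuel →
      PySem.Chars.replace.go (c0 :: p) new fuel l acc = acc.reverse ++ rep1 c0 p new l := by
  intro fuel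
  induction fuel with
  | zero =>
    intro l acc h
    have : l = [] := List.eq_nil_of_length_eq_zero (Nat.le_zero.mp h)
    subst this
    simp [PySem.Chars.replace.go, rep1]
  | succ n ih =>
    intro l acc h
    match l with
    | [] => simp [PySem.Chars.replace.go, rep1]
    | c :: t =>
      rw [PySem.Chars.replace.go]
      have hT : t.length ≤ n := by simp only [List.length_cons] at h; omega
      by_cases hp : (c0 :: p).isPrefixOf (c :: t)
      · have hD : (List.drop (c0 :: p).length (c :: t)).length ≤ n := by
          simp only [List.length_drop, List.length_cons]; omega
        rw [if_pos hp, ih _ _ hD, rep1, if_pos hp]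
        simp
      · rw [if_neg hp, ih _ _ hT, rep1, if_neg hp]
        simp

theorem replace_eq_rep1 (c0 : Char) (p new s : List Char) :
    PySem.Chars.replace s (c0 :: p) new = rep1 c0 p new s := by
  rw [PySem.Chars.replace]
  simp [go_spec c0 p new s.length s [] (le_refl _)]

-- rep1 is the identity when the pattern does not occur
theorem rep1_id (c0 : Char) (p new : List Char) :
    ∀ s, ¬ (c0 :: p) <:+: s → rep1 c0 p new s = s := by
  intro s
  induction s with
  | nil => intro _; rw [rep1]
  | cons c t ih =>
    intro h
    rw [rep1]
    have hp : ¬ (c0 :: p).isPrefixOf (c :: t) := by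
      intro hpre
      exact h (List.IsPrefix.isInfix (List.isPrefixOf_iff_prefix.mp hpre))
    rw [if_neg hp, ih (fun hi => h (hi.trans (List.suffix_cons c t).isInfix))]

-- prefix transparency: replacing a pattern whose head is not in w, with '***', neither creates nor destroys a prefix w
theorem prefix_rep1 (c0 : Char) (p : List Char) :
    ∀ n x w, x.length ≤ n → '*' ∉ w → c0 ∉ w →
      ((w <+: rep1 c0 p ['*','*','*'] x) ↔ (w <+: x)) := by
  intro n
  induction n with
  | zero =>
    intro x w hx _ _
    have : x = [] := List.eq_nil_of_length_eq_zero (Nat.le_zero.mp hx)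
    subst this; rw [rep1]
  | succ n ih =>
    intro x w hx hstar hc0
    match x with
    | [] => rw [rep1]
    | c :: t =>
      rw [rep1]
      by_cases hp : (c0 :: p).isPrefixOf (c :: t)
      · rw [if_pos hp]
        have hc : c = c0 := by
          have := List.isPrefixOf_iff_prefix.mp hp
          exact (List.cons_prefix_cons.mp this).1.symm
        constructor
        · intro hw
          match w with
          | [] => exact List.nil_prefix
          | a :: w' =>
            exfalso
            have : a = '*' := (List.cons_prefix_cons.mp hw).1
            exact hstar (this ▸ List.mem_cons_self)
        · intro hw
          match w with
          | [] => exact List.nil_prefix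
          | a :: w' =>
            exfalso
            have : a = c := (List.cons_prefix_cons.mp hw).1
            exact hc0 (by simp [← hc, this])
      · rw [if_neg hp]
        match w with
        | [] => simp
        | a :: w' =>
          rw [List.cons_prefix_cons, List.cons_prefix_cons]
          have ht : t.length ≤ n := by simp at hx; omega
          rw [ih t w' ht (fun ha => hstar (List.mem_cons_of_mem _ ha))
                (fun ha => hc0 (List.mem_cons_of_mem _ ha))]

-- abbreviations for the three passes
def repD (x : List Char) : List Char := rep1 'd' ['u','c','k'] ['*','*','*'] x
def repS (x : List Char) : List Char := rep1 's' ['h','o','o','t'] ['*','*','*'] x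
def repP (x : List Char) : List Char := rep1 'p' ['o','o','p','i','e'] ['*','*','*'] x

-- a '***' block passes through repS / repP untouched
theorem repS_star (y : List Char) : repS ('*'::'*'::'*'::y) = '*'::'*'::'*':: repS y := by
  simp [repS, rep1, List.isPrefixOf]

theorem repP_star (y : List Char) : repP ('*'::'*'::'*'::y) = '*'::'*'::'*':: repP y := by
  simp [repP, rep1, List.isPrefixOf]

-- the single pass equals the three sequential passes
set_option maxRecDepth 8000 in
theorem scan_eq_three : ∀ n x, x.length ≤ n → censorScan x = repP (repS (repD x)) := by
  intro n
  induction n with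
  | zero =>
    intro x hx
    have : x = [] := List.eq_nil_of_length_eq_zero (Nat.le_zero.mp hx)
    subst this
    simp [censorScan, repD, repS, repP, rep1]
  | succ n ih =>
    intro x hx
    by_cases hD : (['d','u','c','k'] : List Char).isPrefixOf x
    · obtain ⟨t, rfl⟩ := List.isPrefixOf_iff_prefix.mp hD
      have ht : t.length ≤ n := by simp at hx; omega
      have h1 : repD ('d'::'u'::'c'::'k'::t) = '*'::'*'::'*':: repD t := by
        simp [repD, rep1, List.isPrefixOf]
      have hscan : censorScan ('d'::'u'::'c'::'k'::t) = '*'::'*'::'*':: censorScan t := by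
        simp [censorScan, List.isPrefixOf]
      simp only [List.cons_append, List.nil_append] at *
      rw [hscan, h1, repS_star, repP_star, ih t ht]
    · by_cases hS : (['s','h','o','o','t'] : List Char).isPrefixOf x
      · obtain ⟨t, rfl⟩ := List.isPrefixOf_iff_prefix.mp hS
        have ht : t.length ≤ n := by simp at hx; omega
        have h1 : repD ('s'::'h'::'o'::'o'::'t'::t) = 's'::'h'::'o'::'o'::'t':: repD t := by
          simp [repD, rep1, List.isPrefixOf]
        have h2 : repS ('s'::'h'::'o'::'o'::'t':: repD t) = '*'::'*'::'*':: repS (repD t) := by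
          simp [repS, rep1, List.isPrefixOf]
        have hscan : censorScan ('s'::'h'::'o'::'o'::'t'::t) = '*'::'*'::'*':: censorScan t := by
          simp [censorScan, List.isPrefixOf]
        simp only [List.cons_append, List.nil_append] at *
        rw [hscan, h1, h2, repP_star, ih t ht]
      · by_cases hP : (['p','o','o','p','i','e'] : List Char).isPrefixOf x
        · obtain ⟨t, rfl⟩ := List.isPrefixOf_iff_prefix.mp hP
          have ht : t.length ≤ n := by simp at hx; omega
          have h1 : repD ('p'::'o'::'o'::'p'::'i'::'e'::t) = 'p'::'o'::'o'::'p'::'i'::'e':: repD t := by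
            simp [repD, rep1, List.isPrefixOf]
          have h2 : repS ('p'::'o'::'o'::'p'::'i'::'e':: repD t) = 'p'::'o'::'o'::'p'::'i'::'e':: repS (repD t) := by
            simp [repS, rep1, List.isPrefixOf]
          have h3 : repP ('p'::'o'::'o'::'p'::'i'::'e':: repS (repD t)) = '*'::'*'::'*':: repP (repS (repD t)) := by
            simp [repP, rep1, List.isPrefixOf]
          have hscan : censorScan ('p'::'o'::'o'::'p'::'i'::'e'::t) = '*'::'*'::'*':: censorScan t := by
            simp [censorScan, List.isPrefixOf]
          simp only [List.cons_append, List.nil_append] at *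
          rw [hscan, h1, h2, h3, ih t ht]
        · match x with
          | [] => simp [censorScan, repD, repS, repP, rep1]
          | c :: t =>
            have ht : t.length ≤ n := by simp at hx; omega
            have h1 : repD (c :: t) = c :: repD t := by
              simp only [repD]; rw [rep1, if_neg hD]
            have hS2 : ¬ (['s','h','o','o','t'] : List Char) <+: (c :: repD t) := by
              intro hpre
              obtain ⟨hc, hrest⟩ := List.cons_prefix_cons.mp hpre
              have := (prefix_rep1 'd' ['u','c','k'] t.length t ['h','o','o','t'] (le_refl _)
                (by decide) (by decide)).mp (by rw [repD] at hrest; exact hrest)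
              exact hS (List.isPrefixOf_iff_prefix.mpr (List.cons_prefix_cons.mpr ⟨hc, this⟩))
            have h2 : repS (c :: repD t) = c :: repS (repD t) := by
              simp only [repS]; rw [rep1, if_neg (fun hb => hS2 (List.isPrefixOf_iff_prefix.mp hb))]
            have hP2 : ¬ (['p','o','o','p','i','e'] : List Char) <+: (c :: repS (repD t)) := by
              intro hpre
              obtain ⟨hc, hrest⟩ := List.cons_prefix_cons.mp hpre
              have s1 := (prefix_rep1 's' ['h','o','o','t'] (repD t).length (repD t)
                ['o','o','p','i','e'] (le_refl _) (by decide) (by decide)).mp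
                (by rw [repS] at hrest; exact hrest)
              have s2 := (prefix_rep1 'd' ['u','c','k'] t.length t ['o','o','p','i','e'] (le_refl _)
                (by decide) (by decide)).mp (by rw [repD] at s1; exact s1)
              exact hP (List.isPrefixOf_iff_prefix.mpr (List.cons_prefix_cons.mpr ⟨hc, s2⟩))
            have h3 : repP (c :: repS (repD t)) = c :: repP (repS (repD t)) := by
              simp only [repP]; rw [rep1, if_neg (fun hb => hP2 (List.isPrefixOf_iff_prefix.mp hb))]
            rw [censorScan, if_neg hD, if_neg hS, if_neg hP, h1, h2, h3, ih t ht]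

-- A's whole loop body on strings, expressed over char lists
set_option maxRecDepth 8000 in
theorem chain_eq (s : String) :
    ((["duck", "shoot", "poopie"] : List String).foldl (fun sentence swear =>
        if PySem.Str.isIn swear sentence then PySem.Str.replace sentence swear "***"
        else sentence) s)
      = String.ofList (repP (repS (repD s.toList))) := by
  have step : ∀ (u : String) (c0 : Char) (p : List Char),
      (if PySem.Str.isIn (String.ofList (c0 :: p)) u
        then PySem.Str.replace u (String.ofList (c0 :: p)) "***" else u)
        = String.ofList (rep1 c0 p ['*','*','*'] u.toList) := by
    intro u c0 p
    by_cases h : PySem.Chars.isIn (c0 :: p) u.toList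
    · rw [if_pos (by rw [PySem.Str.isIn, String.toList_ofList]; exact h),
        PySem.Str.replace]
      rw [String.toList_ofList]
      have : "***".toList = ['*','*','*'] := rfl
      rw [this, replace_eq_rep1]
    · rw [if_neg (by rw [PySem.Str.isIn, String.toList_ofList]; exact h)]
      have := (PySem.Chars.isIn_eq_false_iff _ _).mp (Bool.eq_false_iff.mpr h)
      rw [rep1_id c0 p _ _ this, String.ofList_toList]
  have e1 : ("duck" : String) = String.ofList ['d','u','c','k'] := rfl
  have e2 : ("shoot" : String) = String.ofList ['s','h','o','o','t'] := rfl
  have e3 : ("poopie" : String) = String.ofList ['p','o','o','p','i','e'] := rfl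
  simp only [List.foldl_cons, List.foldl_nil]
  simp only [e1, e2, e3]
  simp only [step, String.toList_ofList]
  simp only [repD, repS, repP]

theorem censor_spec : Claim_equal_censor := by
  intro phrase _
  unfold Spec_censor censor censor_alt
  by_cases h : phrase = ""
  · subst h; rfl
  · have hb1 : ("" == phrase) = false := beq_eq_false_iff_ne.mpr (Ne.symm h)
    have hb2 : (phrase == "") = false := beq_eq_false_iff_ne.mpr h
    rw [if_neg (by simp [hb1]), if_neg (by simp [hb2])]
    exact (chain_eq phrase).trans
      (congrArg String.ofList (scan_eq_three phrase.toList.length phrase.toList (le_refl _)).symm)
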